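-- pv_equiv track=rewrite | github.com/Glen02lee/PPS_solved | 4주차/A205_이민석_20250202.py | count_trailing_zeros
-- ===== SOURCE A (Python) =====
-- def count_trailing_zeros(n, m):
--     def count_factors(n, factor):
--         count = 0
--         while n >= factor:
--             count += n // factor
--             n //= factor
--         return count
--
--     count_5_n = count_factors(n, 5)
--     count_5_m = count_factors(m, 5)
--     count_5_nm = count_factors(n - m, 5)
--
--     count_2_n = count_factors(n, 2)
--     count_2_m = count_factors(m, 2)
--     count_2_nm = count_factors(n - m, 2)
--
--     count_5 = count_5_n - (count_5_m + count_5_nm)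
--     count_2 = count_2_n - (count_2_m + count_2_nm)
--
--     return min(count_2, count_5)
-- ===== SOURCE B (Python) =====
-- def count_trailing_zeros(n, m):
--     # exponent of p in x! via Legendre's digit-sum formula: (x - s_p(x)) // (p - 1);
--     # 0 for x < 0 (factorial exponent undefined there; matches returning no factors).
--     def exp_fact(x, p):
--         if x < 0:
--             return 0
--         s = 0
--         t = x
--         while t > 0:
--             s += t % p
--             t //= p
--         return (x - s) // (p - 1)
--
--     e2 = exp_fact(n, 2) - exp_fact(m, 2) - exp_fact(n - m, 2)
--     e5 = exp_fact(n, 5) - exp_fact(m, 5) - exp_fact(n - m, 5)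
--     return min(e2, e5)
-- ===== Notes on version B (the rewrite author's own statement) =====
-- stated objective: alternative
-- what changed: Replaces the six while-loops of repeated floor-division quotient sums (Legendre counting by successive division) with a closed-form per-number computation: exponent of p in x! is obtained from the base-p digit sum as (x - s_p(x)) // (p - 1), so each exponent takes one digit-extraction loop and one formula instead of an accumulating quotient loop.
import Mathlib
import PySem

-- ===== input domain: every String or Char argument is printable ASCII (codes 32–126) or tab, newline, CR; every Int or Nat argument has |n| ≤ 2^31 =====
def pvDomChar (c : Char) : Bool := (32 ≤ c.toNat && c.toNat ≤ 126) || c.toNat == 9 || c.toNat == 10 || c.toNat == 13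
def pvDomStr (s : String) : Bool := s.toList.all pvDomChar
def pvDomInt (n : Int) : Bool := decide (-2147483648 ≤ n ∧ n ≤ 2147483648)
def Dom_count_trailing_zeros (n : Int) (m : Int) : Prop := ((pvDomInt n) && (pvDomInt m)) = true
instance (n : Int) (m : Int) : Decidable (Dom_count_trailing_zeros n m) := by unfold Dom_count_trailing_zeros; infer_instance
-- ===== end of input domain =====

-- B replaces A's six repeated-quotient Legendre loops by the closed-form digit-sum
-- formula e_p(x!) = (x - s_p(x)) / (p - 1); objective: alternative (same cost, different algorithm).

-- termination helper: floor division by a factor ≥ 2 strictly shrinks a positive Int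
theorem pv_ediv_shrink (a b : Int) (ha : 0 < a) (hb : 2 ≤ b) : 0 ≤ a / b ∧ a / b < a := by
  constructor
  · exact Int.ediv_nonneg (by omega) (by omega)
  · rw [Int.ediv_lt_iff_lt_mul (by omega)]
    nlinarith

-- ===== PORT A =====
-- `while n >= factor: count += n // factor; n //= factor`; the `2 ≤ factor` conjunct
-- is a totality guard only (the Python calls it with factor = 2 and 5).
def pvCountFactors (n : Int) (factor : Int) : Int :=
  if _h : 2 ≤ factor ∧ factor ≤ n then
    PySem.Int.floordiv n factor + pvCountFactors (PySem.Int.floordiv n factor) factor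
  else 0
termination_by n.toNat
decreasing_by
  have hp : (0:Int) < factor := by omega
  rw [PySem.Int.floordiv_eq_ediv_of_pos hp]
  have h12 := pv_ediv_shrink n factor (by omega) (by omega)
  omega

def count_trailing_zeros (n : Int) (m : Int) : Int :=
  let count_5_n := pvCountFactors n 5
  let count_5_m := pvCountFactors m 5
  let count_5_nm := pvCountFactors (n - m) 5
  let count_2_n := pvCountFactors n 2
  let count_2_m := pvCountFactors m 2
  let count_2_nm := pvCountFactors (n - m) 2
  let count_5 := count_5_n - (count_5_m + count_5_nm)
  let count_2 := count_2_n - (count_2_m + count_2_nm)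
  min count_2 count_5

-- ===== PORT B =====
-- `while t > 0: s += t % p; t //= p`; the `2 ≤ p` conjunct is a totality guard only
-- (the Python calls it with p = 2 and 5).
def pvDigitSum (t : Int) (p : Int) : Int :=
  if _h : 0 < t ∧ 2 ≤ p then
    PySem.Int.mod t p + pvDigitSum (PySem.Int.floordiv t p) p
  else 0
termination_by t.toNat
decreasing_by
  have hp : (0:Int) < p := by omega
  rw [PySem.Int.floordiv_eq_ediv_of_pos hp]
  have h12 := pv_ediv_shrink t p (by omega) (by omega)
  omega

def pvExpFact (x : Int) (p : Int) : Int :=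
  if x < 0 then 0
  else PySem.Int.floordiv (x - pvDigitSum x p) (p - 1)

def count_trailing_zeros_alt (n : Int) (m : Int) : Int :=
  let e2 := pvExpFact n 2 - pvExpFact m 2 - pvExpFact (n - m) 2
  let e5 := pvExpFact n 5 - pvExpFact m 5 - pvExpFact (n - m) 5
  min e2 e5

-- ===== PRECONDITION & SPEC =====
def Spec_count_trailing_zeros (n : Int) (m : Int) (out : Int) : Prop := out = count_trailing_zeros_alt n m
instance (n : Int) (m : Int) (out : Int) : Decidable (Spec_count_trailing_zeros n m out) := by unfold Spec_count_trailing_zeros; infer_instance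

-- ===== CLAIM (what is proved, stated in full; the proofs are below) =====
def Claim_equal_count_trailing_zeros : Prop := ∀ (n : Int) (m : Int), Dom_count_trailing_zeros n m → Spec_count_trailing_zeros n m (count_trailing_zeros n m)

-- ===== LEMMAS AND PROOFS =====

-- Legendre's identity: for 0 ≤ x, x - s_p(x) = (p - 1) * (sum of successive quotients)
theorem key_digit_sum (p : Int) (hp : 2 ≤ p) :
    ∀ (k : Nat) (x : Int), x.toNat = k → 0 ≤ x →
      x - pvDigitSum x p = pvCountFactors x p * (p - 1) := by
  intro k
  induction k using Nat.strong_induction_on with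
  | _ k ih =>
    intro x hk hx
    have hppos : (0:Int) < p := by omega
    by_cases hxp : p ≤ x
    · -- x ≥ p: both recurse on q = x // p
      have hq0 : 0 ≤ PySem.Int.floordiv x p := by
        rw [PySem.Int.floordiv_eq_ediv_of_pos hppos]
        exact Int.ediv_nonneg hx (by omega)
      have hqlt : (PySem.Int.floordiv x p).toNat < k := by
        rw [PySem.Int.floordiv_eq_ediv_of_pos hppos]
        have := pv_ediv_shrink x p (by omega) hp
        omega
      have hIH := ih _ hqlt (PySem.Int.floordiv x p) rfl hq0
      have hdiv := PySem.Int.floordiv_mul_add_mod x p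
      rw [pvDigitSum, pvCountFactors]
      rw [dif_pos ⟨by omega, hp⟩, dif_pos ⟨hp, hxp⟩]
      linear_combination hIH - hdiv
    · -- 0 ≤ x < p: count is 0, digit sum is x itself (or 0 if x = 0)
      rw [pvCountFactors, dif_neg (by omega)]
      by_cases hx0 : 0 < x
      · rw [pvDigitSum, dif_pos ⟨hx0, hp⟩]
        have hq : PySem.Int.floordiv x p = 0 := by
          rw [PySem.Int.floordiv_eq_ediv_of_pos hppos]
          exact Int.ediv_eq_zero_of_lt hx (by omega)
        have hm : PySem.Int.mod x p = x := by
          have := PySem.Int.floordiv_mul_add_mod x p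
          rw [hq] at this; omega
        rw [hq, hm, pvDigitSum, dif_neg (by omega)]; ring
      · have : x = 0 := by omega
        subst this
        rw [pvDigitSum, dif_neg (by omega)]; ring

theorem expFact_eq_countFactors (x p : Int) (hp : 2 ≤ p) :
    pvExpFact x p = pvCountFactors x p := by
  unfold pvExpFact
  by_cases hx : x < 0
  · rw [if_pos hx, pvCountFactors, dif_neg (by omega)]
  · rw [if_neg hx, key_digit_sum p hp x.toNat x rfl (by omega),
      PySem.Int.floordiv_eq_ediv_of_pos (by omega : (0:Int) < p - 1)]
    exact Int.mul_ediv_cancel _ (by omega)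

-- ===== VERDICT (by name: the statement is the Claim_ definition above) =====
theorem count_trailing_zeros_spec : Claim_equal_count_trailing_zeros := by
  intro n m _
  unfold Spec_count_trailing_zeros count_trailing_zeros count_trailing_zeros_alt
  simp only [expFact_eq_countFactors _ 2 (by omega), expFact_eq_countFactors _ 5 (by omega)]
  congr 1 <;> ring
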